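-- pv_equiv track=rewrite | github.com/ahammer3/nyc-free | scraper.py | _expand_day_range
-- ===== SOURCE A (Python) =====
-- _DAY_MAP = {
--     "mon": 0, "monday": 0,
--     "tue": 1, "tuesday": 1,
--     "wed": 2, "wednesday": 2,
--     "thu": 3, "thursday": 3,
--     "fri": 4, "friday": 4,
--     "sat": 5, "saturday": 5,
--     "sun": 6, "sunday": 6,
-- }
--
-- def _day_name_to_int(name: str):
--     """Convert a day name (or abbreviation) to Python weekday int (0=Mon, 6=Sun)."""
--     return _DAY_MAP.get(name.lower().rstrip("s"))
--
-- def _expand_day_range(start_day: str, end_day: str):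
--     """Expand 'Tuesday-Saturday' into a set of weekday ints."""
--     s = _day_name_to_int(start_day)
--     e = _day_name_to_int(end_day)
--     if s is None or e is None:
--         return set()
--     days = set()
--     i = s
--     while True:
--         days.add(i)
--         if i == e:
--             break
--         i = (i + 1) % 7
--     return days
-- ===== SOURCE B (Python) =====
-- _DAY_NAMES = ["monday", "tuesday", "wednesday", "thursday", "friday", "saturday", "sunday"]
--
-- def _day_name_to_int(name: str):
--     """Convert a day name (or abbreviation) to Python weekday int (0=Mon, 6=Sun)."""
--     key = name.lower().rstrip("s")
--     for i, full in enumerate(_DAY_NAMES):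
--         if key == full or key == full[:3]:
--             return i
--     return None
--
-- def _expand_day_range(start_day: str, end_day: str):
--     """Expand 'Tuesday-Saturday' into a set of weekday ints."""
--     s = _day_name_to_int(start_day)
--     e = _day_name_to_int(end_day)
--     if s is None or e is None:
--         return set()
--     n = (e - s) % 7 + 1
--     return {(s + k) % 7 for k in range(n)}
-- ===== Notes on version B (the rewrite author's own statement) =====
-- stated objective: alternative
-- what changed: The dict lookup becomes a linear scan over the seven full day names matching the name or its 3-letter prefix, and the one-day-at-a-time modular while loop becomes the closed-form count n=(e-s)%7+1 with the comprehension {(s+k)%7 for k in range(n)}.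
import Mathlib
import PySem

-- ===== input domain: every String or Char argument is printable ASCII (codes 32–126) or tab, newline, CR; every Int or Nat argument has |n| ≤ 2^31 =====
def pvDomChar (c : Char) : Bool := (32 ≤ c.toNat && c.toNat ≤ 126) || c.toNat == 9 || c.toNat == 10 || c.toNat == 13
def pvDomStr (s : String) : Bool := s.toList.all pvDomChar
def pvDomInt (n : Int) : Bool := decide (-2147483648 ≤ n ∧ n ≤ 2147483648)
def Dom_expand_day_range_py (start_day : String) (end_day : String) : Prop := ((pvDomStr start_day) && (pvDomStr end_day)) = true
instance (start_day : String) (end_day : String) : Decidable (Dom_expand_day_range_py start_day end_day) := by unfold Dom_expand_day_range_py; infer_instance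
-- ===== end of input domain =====

-- B replaces the dict lookup by a linear scan over full day names (matching the full name or its
-- 3-letter prefix) and the step-by-step modular while loop by a closed-form count
-- n = (e-s)%7+1 with a comprehension {(s+k)%7 for k in range(n)} (objective: simpler).

-- ===== PORT A =====
-- _DAY_MAP (a literal dict with distinct keys)
def pvDayMap : PySem.Dict String Int := PySem.Dict.mk
  [("mon", 0), ("monday", 0),
   ("tue", 1), ("tuesday", 1),
   ("wed", 2), ("wednesday", 2),
   ("thu", 3), ("thursday", 3),
   ("fri", 4), ("friday", 4),
   ("sat", 5), ("saturday", 5),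
   ("sun", 6), ("sunday", 6)]

-- _day_name_to_int: _DAY_MAP.get(name.lower().rstrip("s"))
-- name.lower().rstrip("s"); rstrip with a one-character chars argument is exactly
-- 'drop trailing 's' characters' (ported by hand: PySem has no rstrip-with-chars)
def pvRstripS (s : String) : String :=
  String.ofList ((s.toList.reverse.dropWhile (fun c => c == 's')).reverse)

def pvDayNameToInt (name : String) : Option Int :=
  pvDayMap.get? (pvRstripS (PySem.Str.lower name))

-- the 'while True' loop of A; it runs at most 7 iterations (i cycles mod 7 and stops at e),
-- so fuel 7 is only a totality guard, never exhausted on the values _day_name_to_int yields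
def pvLoopA (e : Int) : Nat → Int → List Int → List Int
  | 0, _, days => days
  | n + 1, i, days =>
      let days := PySem.Set.add days i
      if i = e then days else pvLoopA e n (PySem.Int.mod (i + 1) 7) days

def expand_day_range_py (start_day : String) (end_day : String) : List Int :=
  match pvDayNameToInt start_day, pvDayNameToInt end_day with
  | some s, some e => pvLoopA e 7 s PySem.Set.empty
  | _, _ => PySem.Set.empty

-- ===== PORT B =====
-- _DAY_NAMES
def pvAltDayNames : List String :=
  ["monday", "tuesday", "wednesday", "thursday", "friday", "saturday", "sunday"]

-- the 'for i, full in enumerate(_DAY_NAMES)' scan with early return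
def pvAltScan (key : String) : Int → List String → Option Int
  | _, [] => none
  | i, full :: rest =>
      if key == full || key == PySem.Str.slice full none (some 3) then some i
      else pvAltScan key (i + 1) rest

-- B's _day_name_to_int
-- B's copy of the same key normalisation (rstrip("s") ported by hand, as above)
def pvAltRstripS (s : String) : String :=
  String.ofList ((s.toList.reverse.dropWhile (fun c => c == 's')).reverse)

def pvAltDayNameToInt (name : String) : Option Int :=
  pvAltScan (pvAltRstripS (PySem.Str.lower name)) 0 pvAltDayNames

def expand_day_range_py_alt (start_day : String) (end_day : String) : List Int :=
  match pvAltDayNameToInt start_day, pvAltDayNameToInt end_day with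
  | none, _ => PySem.Set.empty
  | _, none => PySem.Set.empty
  | some s, some e =>
      let n := PySem.Int.mod (e - s) 7 + 1
      PySem.Set.ofList ((PySem.List.pyRange 0 n 1).map (fun k => PySem.Int.mod (s + k) 7))

-- ===== PRECONDITION & SPEC =====
def Spec_expand_day_range_py (start_day : String) (end_day : String) (out : List Int) : Prop := out = expand_day_range_py_alt start_day end_day
instance (start_day : String) (end_day : String) (out : List Int) : Decidable (Spec_expand_day_range_py start_day end_day out) := by unfold Spec_expand_day_range_py; infer_instance

-- ===== CLAIM (what is proved, stated in full; the proofs are below) =====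
def Claim_equal_expand_day_range_py : Prop := ∀ (start_day : String) (end_day : String), Dom_expand_day_range_py start_day end_day → Spec_expand_day_range_py start_day end_day (expand_day_range_py start_day end_day)

-- ===== LEMMAS AND PROOFS =====

-- the two lookups agree on every key string
theorem pvLookupCore (k : String) : pvAltScan k 0 pvAltDayNames = pvDayMap.get? k := by
  by_cases h : k ∈ (["mon", "monday", "tue", "tuesday", "wed", "wednesday", "thu", "thursday",
                     "fri", "friday", "sat", "saturday", "sun", "sunday"] : List String)
  · simp only [List.mem_cons, List.not_mem_nil, or_false] at h
    rcases h with h|h|h|h|h|h|h|h|h|h|h|h|h|h <;> subst h <;> decide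
  · simp only [List.mem_cons, List.not_mem_nil, or_false, not_or] at h
    obtain ⟨h1,h2,h3,h4,h5,h6,h7,h8,h9,h10,h11,h12,h13,h14⟩ := h
    simp [pvAltScan, pvAltDayNames, pvDayMap, PySem.Dict.get?,
          (show PySem.Str.slice "monday" none (some 3) = "mon" by decide),
          (show PySem.Str.slice "tuesday" none (some 3) = "tue" by decide),
          (show PySem.Str.slice "wednesday" none (some 3) = "wed" by decide),
          (show PySem.Str.slice "thursday" none (some 3) = "thu" by decide),
          (show PySem.Str.slice "friday" none (some 3) = "fri" by decide),
          (show PySem.Str.slice "saturday" none (some 3) = "sat" by decide),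
          (show PySem.Str.slice "sunday" none (some 3) = "sun" by decide),
          h1, h2, h3, h4, h5, h6, h7, h8, h9, h10, h11, h12, h13, h14,
          Ne.symm h1, Ne.symm h2, Ne.symm h3, Ne.symm h4, Ne.symm h5, Ne.symm h6, Ne.symm h7,
          Ne.symm h8, Ne.symm h9, Ne.symm h10, Ne.symm h11, Ne.symm h12, Ne.symm h13, Ne.symm h14]

theorem pvLookup_eq (name : String) : pvAltDayNameToInt name = pvDayNameToInt name := by
  unfold pvAltDayNameToInt pvDayNameToInt pvAltRstripS pvRstripS
  exact pvLookupCore _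

-- every value returned by A's lookup is one of 0..6
theorem pvDayNameToInt_range (name : String) (v : Int)
    (h : pvDayNameToInt name = some v) : v ∈ ([0, 1, 2, 3, 4, 5, 6] : List Int) := by
  unfold pvDayNameToInt at h
  have hm := PySem.Dict.mem_items_of_get?_eq_some _ h
  simp only [pvDayMap, List.mem_cons, List.not_mem_nil, or_false, Prod.mk.injEq] at hm
  rcases hm with ⟨_, h2⟩|⟨_, h2⟩|⟨_, h2⟩|⟨_, h2⟩|⟨_, h2⟩|⟨_, h2⟩|⟨_, h2⟩|⟨_, h2⟩|⟨_, h2⟩|⟨_, h2⟩|⟨_, h2⟩|⟨_, h2⟩|⟨_, h2⟩|⟨_, h2⟩ <;>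
    subst h2 <;> decide

-- the core agreement, checked for all 49 possible (s, e) pairs
theorem pvCore : ∀ s ∈ ([0, 1, 2, 3, 4, 5, 6] : List Int), ∀ e ∈ ([0, 1, 2, 3, 4, 5, 6] : List Int),
    pvLoopA e 7 s PySem.Set.empty =
      PySem.Set.ofList ((PySem.List.pyRange 0 (PySem.Int.mod (e - s) 7 + 1) 1).map
        (fun k => PySem.Int.mod (s + k) 7)) := by
  decide

-- ===== VERDICT (by name: the statement is the Claim_ definition above) =====
theorem expand_day_range_py_spec : Claim_equal_expand_day_range_py := by
  intro sd ed _
  unfold Spec_expand_day_range_py expand_day_range_py expand_day_range_py_alt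
  rw [pvLookup_eq sd, pvLookup_eq ed]
  rcases hs : pvDayNameToInt sd with _ | s <;> rcases he : pvDayNameToInt ed with _ | e
  · rfl
  · rfl
  · rfl
  · exact pvCore s (pvDayNameToInt_range sd s hs) e (pvDayNameToInt_range ed e he)
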